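-- pv_equiv track=rewrite | github.com/dwtemple1/AI2C-Prereqs | Python/Lesson 04 - Data Structures/nested_structures_solution.py | list_numbers
-- ===== SOURCE A (Python) =====
-- import math
--
-- def list_numbers(N, C, my_numbers):
--     rows = math.ceil(N / C)
--     counter = 0
--     my_table = []
--     while counter < rows * C:
--         for row in range(rows):
--             new_row = []
--             for col in range(C):
--                 if counter < len(my_numbers):
--                     new_row.append(my_numbers[counter])
--                 else:
--                     new_row.append(None)
--                 counter += 1
--             my_table.append(new_row)
--     return my_table
-- ===== SOURCE B (Python) =====
-- import math
--
-- def list_numbers(N, C, my_numbers):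
--     rows = math.ceil(N / C)
--     total = rows * C
--     if total <= 0:
--         return []
--     padded = (list(my_numbers) + [None] * (total - len(my_numbers)))[:total]
--     return [padded[i:i + C] for i in range(0, total, C)]
-- ===== Notes on version B (the rewrite author's own statement) =====
-- stated objective: simpler
-- what changed: Replaces the cell-by-cell while/nested-for with counter-state by building one flat padded list of length rows*C and slicing it into whole rows.
import Mathlib
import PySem

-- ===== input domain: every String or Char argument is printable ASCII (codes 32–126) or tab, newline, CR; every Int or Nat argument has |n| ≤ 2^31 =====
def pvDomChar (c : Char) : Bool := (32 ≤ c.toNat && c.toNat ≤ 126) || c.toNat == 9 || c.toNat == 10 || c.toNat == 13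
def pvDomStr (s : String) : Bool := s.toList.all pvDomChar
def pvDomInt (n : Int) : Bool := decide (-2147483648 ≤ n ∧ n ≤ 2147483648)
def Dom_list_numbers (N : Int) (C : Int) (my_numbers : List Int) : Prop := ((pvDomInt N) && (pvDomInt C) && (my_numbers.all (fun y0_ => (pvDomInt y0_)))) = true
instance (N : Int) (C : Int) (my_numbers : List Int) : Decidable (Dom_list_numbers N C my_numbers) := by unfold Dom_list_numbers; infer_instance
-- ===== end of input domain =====

-- B replaces A's cell-by-cell while/nested-for with counter state by building one flat padded
-- list and slicing it into whole rows (objective: simpler).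

-- ===== PORT A =====
-- the cell A appends: my_numbers[counter] if counter < len(my_numbers) else None
def pvCell (mn : List Int) (k : Int) : Option Int :=
  if k < (mn.length : Int) then PySem.List.pyGet? mn k else none

-- body of 'for col in range(C)': state (counter, new_row)
def pvInnerStep (mn : List Int) (st : Int × List (Option Int)) (_ : Int) :
    Int × List (Option Int) :=
  (st.1 + 1, st.2 ++ [pvCell mn st.1])

-- body of 'for row in range(rows)': state (counter, my_table)
def pvOuterStep (mn : List Int) (C : Int) (st : Int × List (List (Option Int))) (_ : Int) :
    Int × List (List (Option Int)) :=
  let inner := (PySem.List.pyRange 0 C 1).foldl (pvInnerStep mn) (st.1, [])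
  (inner.1, st.2 ++ [inner.2])

-- math.ceil(N / C) is ported as exact ceiling division -((-N) // C): exact on Dom, where
-- |N|, |C| ≤ 2^31 keeps the correctly rounded float N / C from crossing an integer.
-- A's outer 'while counter < rows * C' runs its body at most once on every input where A
-- terminates (the nested fors advance counter by exactly rows * C), so it is ported as a
-- single conditional pass; inputs on which the while never terminates are outside Pre_.
def list_numbers (N : Int) (C : Int) (my_numbers : List Int) : List (List (Option Int)) :=
  let rows : Int := -(PySem.Int.floordiv (-N) C)
  if 0 < rows * C then
    ((PySem.List.pyRange 0 rows 1).foldl (pvOuterStep my_numbers C) (0, [])).2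
  else []

-- ===== PORT B =====
def list_numbers_alt (N : Int) (C : Int) (my_numbers : List Int) : List (List (Option Int)) :=
  let rows : Int := -(PySem.Int.floordiv (-N) C)  -- math.ceil(N / C), exact on Dom (see above)
  let total := rows * C
  if total ≤ 0 then []
  else
    -- (list(my_numbers) + [None] * (total - len(my_numbers)))[:total]
    let padded := PySem.List.slice
      (my_numbers.map some ++ List.replicate (total - (my_numbers.length : Int)).toNat (none : Option Int))
      none (some total)
    (PySem.List.pyRange 0 total C).map (fun i => PySem.List.slice padded (some i) (some (i + C)))

-- ===== PRECONDITION & SPEC =====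
-- C = 0 makes A raise ZeroDivisionError; C < 0 with N ≥ -C makes rows negative while
-- rows * C > 0, so A's while loop never terminates (range(rows) is empty and counter
-- never advances). Pre_ admits every input on which A returns.
def Pre_list_numbers (N : Int) (C : Int) (my_numbers : List Int) : Prop :=
  C ≠ 0 ∧ (0 < C ∨ N < -C)
instance (N : Int) (C : Int) (my_numbers : List Int) : Decidable (Pre_list_numbers N C my_numbers) := by
  unfold Pre_list_numbers; infer_instance

def pvWitness_list_numbers : Int × Int × List Int := (5, 2, [1, 2, 3])

def Spec_list_numbers (N : Int) (C : Int) (my_numbers : List Int) (out : List (List (Option Int))) : Prop := out = list_numbers_alt N C my_numbers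
instance (N : Int) (C : Int) (my_numbers : List Int) (out : List (List (Option Int))) : Decidable (Spec_list_numbers N C my_numbers out) := by unfold Spec_list_numbers; infer_instance

-- ===== CLAIM (what is proved, stated in full; the proofs are below) =====
def Claim_equal_list_numbers : Prop := ∀ (N : Int) (C : Int) (my_numbers : List Int), Dom_list_numbers N C my_numbers → Pre_list_numbers N C my_numbers → Spec_list_numbers N C my_numbers (list_numbers N C my_numbers)

-- ===== LEMMAS AND PROOFS =====

-- the inner for-loop appends one cell per iteration and advances counter by 1 each time
theorem pv_inner_fold (mn : List Int) (l : List Int) (c : Int) (acc : List (Option Int)) :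
    l.foldl (pvInnerStep mn) (c, acc) =
      (c + l.length,
       acc ++ (List.range l.length).map (fun (j : Nat) => pvCell mn (c + (j : Int)))) := by
  induction l generalizing c acc with
  | nil => simp
  | cons x xs ih =>
      rw [List.foldl_cons]
      show List.foldl (pvInnerStep mn) (c + 1, acc ++ [pvCell mn c]) xs = _
      rw [ih]
      simp only [Prod.mk.injEq, List.length_cons]
      refine ⟨by push_cast; ring, ?_⟩
      rw [List.range_succ_eq_map, List.map_cons, List.map_map, List.append_assoc,
        List.singleton_append]
      congr 1
      congr 1
      · norm_num
      · refine List.map_congr_left fun j _ => ?_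
        simp only [Function.comp_apply]
        congr 1
        push_cast
        ring

-- the outer for-loop appends one row of (pyRange 0 C 1).length cells per iteration
theorem pv_outer_fold (mn : List Int) (C : Int) (l : List Int) (c : Int)
    (tbl : List (List (Option Int))) :
    l.foldl (pvOuterStep mn C) (c, tbl) =
      (c + l.length * (PySem.List.pyRange 0 C 1).length,
       tbl ++ (List.range l.length).map (fun (r : Nat) =>
         (List.range (PySem.List.pyRange 0 C 1).length).map (fun (j : Nat) =>
           pvCell mn (c + (r : Int) * ((PySem.List.pyRange 0 C 1).length : Int) + (j : Int))))) := by
  induction l generalizing c tbl with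
  | nil => simp
  | cons x xs ih =>
      rw [List.foldl_cons]
      show List.foldl (pvOuterStep mn C)
        ((((PySem.List.pyRange 0 C 1).foldl (pvInnerStep mn) (c, [])).1),
         tbl ++ [((PySem.List.pyRange 0 C 1).foldl (pvInnerStep mn) (c, [])).2]) xs = _
      rw [pv_inner_fold, ih]
      simp only [Prod.mk.injEq, List.length_cons, List.nil_append]
      refine ⟨by push_cast; ring, ?_⟩
      rw [List.range_succ_eq_map, List.map_cons, List.map_map, List.append_assoc,
        List.singleton_append]
      congr 1
      congr 1
      · refine List.map_congr_left fun j _ => ?_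
        congr 1
        push_cast
        ring
      · refine List.map_congr_left fun r _ => ?_
        simp only [Function.comp_apply]
        refine List.map_congr_left fun j _ => ?_
        congr 1
        push_cast
        ring

-- one padded flat cell: element k of the flat padded list is pvCell mn k
theorem pv_padded_getElem (mn : List Int) (pad k : Nat) (hk : k < mn.length + pad) :
    (mn.map some ++ List.replicate pad (none : Option Int))[k]? = some (pvCell mn (k : Int)) := by
  by_cases h : k < mn.length
  · have hI : (k : Int) < (mn.length : Int) := by exact_mod_cast h
    rw [List.getElem?_append_left (by simpa using h)]
    simp [pvCell, hI, PySem.List.pyGet?_natCast, List.getElem?_eq_getElem h]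
  · have hI : ¬ (k : Int) < (mn.length : Int) := by exact_mod_cast h
    have hlt : k - mn.length < pad := by omega
    rw [List.getElem?_append_right (by simpa using Nat.le_of_not_lt h)]
    simp [pvCell, hI, List.getElem?_replicate, hlt]

theorem list_numbers_spec : Claim_equal_list_numbers := by
  intro N C mn _ hpre
  obtain ⟨hC0, hcase⟩ := hpre
  unfold Spec_list_numbers
  simp only [list_numbers, list_numbers_alt]
  set rows : Int := -(PySem.Int.floordiv (-N) C) with hrows
  by_cases hpos : 0 < rows * C
  swap
  · rw [if_neg hpos, if_pos (not_lt.mp hpos)]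
  · -- inside Pre_, a positive total forces 0 < C and 0 < rows
    have hC : 0 < C := by
      rcases hcase with h | h
      · exact h
      · by_contra hnC
        have hneg : C < 0 := by omega
        have hq : PySem.Int.floordiv (-N) C ≤ 0 := by
          by_contra hq
          push_neg at hq
          have hdm := PySem.Int.floordiv_mul_add_mod (-N) C
          have hmb := PySem.Int.mod_neg_bounds (a := -N) (b := C) hneg
          nlinarith [hmb.1, hmb.2]
        have hr : 0 ≤ rows := by omega
        have : rows * C ≤ 0 := mul_nonpos_of_nonneg_of_nonpos hr (le_of_lt hneg)
        omega
    have hrpos : 0 < rows := by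
      by_contra hr
      push_neg at hr
      have : rows * C ≤ 0 := mul_nonpos_of_nonpos_of_nonneg hr (le_of_lt hC)
      omega
    rw [if_pos hpos, if_neg (not_le.mpr hpos)]
    -- A's side via the fold lemmas
    rw [pv_outer_fold]
    dsimp only
    have hlenR : (PySem.List.pyRange 0 rows 1).length = rows.toNat := by
      rw [PySem.List.length_pyRange_one]; norm_num
    have hlenC : (PySem.List.pyRange 0 C 1).length = C.toNat := by
      rw [PySem.List.length_pyRange_one]; norm_num
    -- B's side: the stepped range lists the row starts
    have hrange : PySem.List.pyRange 0 (rows * C) C =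
        (List.range rows.toNat).map (fun (k : Nat) => C * (k : Int)) := by
      rw [PySem.List.pyRange_of_pos 0 (rows * C) hC, if_pos hpos]
      have hdiv : (rows * C - 0 + C - 1) / C = rows := by
        have he : rows * C - 0 + C - 1 = (C - 1) + rows * C := by ring
        rw [he, Int.add_mul_ediv_right _ _ (ne_of_gt hC),
          Int.ediv_eq_zero_of_lt (by omega) (by omega)]
        omega
      rw [hdiv]
      exact List.map_congr_left (fun k _ => by ring)
    rw [hrange, List.map_map, hlenR, hlenC, List.nil_append]
    -- both sides are maps over List.range rows.toNat: compare them row by row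
    refine List.map_congr_left ?_
    intro r hr
    rw [List.mem_range] at hr
    simp only [Function.comp_apply]
    have hrI : ((rows.toNat : Nat) : Int) = rows := Int.toNat_of_nonneg (by omega)
    have hCI : ((C.toNat : Nat) : Int) = C := Int.toNat_of_nonneg (by omega)
    -- rewrite B's row r into take/drop form with Nat bounds
    have htN : rows * C = (((rows * C).toNat : Nat) : Int) :=
      (Int.toNat_of_nonneg (le_of_lt hpos)).symm
    have hCr : C * (r : Int) = ((C.toNat * r : Nat) : Int) := by
      push_cast; rw [hCI]
    have hCrC : C * (r : Int) + C = ((C.toNat * r : Nat) : Int) + ((C.toNat : Nat) : Int) := by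
      push_cast; rw [hCI]
    rw [htN, PySem.List.slice_to_natCast, hCrC, hCr, PySem.List.slice_natCast_add]
    -- compare the rows cell by cell
    apply List.ext_getElem?
    intro j
    by_cases hj : j < C.toNat
    · have hkTI : ((C.toNat * r + j : Nat) : Int) < rows * C := by
        push_cast
        rw [hCI]
        have h1 : ((r : Int) + 1) * C ≤ rows * C :=
          mul_le_mul_of_nonneg_right (by rw [← hrI]; exact_mod_cast hr) (le_of_lt hC)
        have hjI : (j : Int) < C := by rw [← hCI]; exact_mod_cast hj
        nlinarith
      have hkT : C.toNat * r + j < (rows * C).toNat := by omega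
      have hpad : C.toNat * r + j <
          mn.length + ((((rows * C).toNat : Nat) : Int) - (mn.length : Int)).toNat := by omega
      rw [List.getElem?_map, List.getElem?_range hj, Option.map_some,
        List.getElem?_take, if_pos hj, List.getElem?_drop, List.getElem?_take,
        if_pos hkT, pv_padded_getElem mn _ _ hpad]
      congr 1
      push_cast
      rw [hCI]
      ring
    · rw [List.getElem?_eq_none (by simpa using Nat.le_of_not_lt hj),
        List.getElem?_take, if_neg hj]
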